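-- pv_equiv track=rewrite | github.com/chakra-project/packages-platform | larch/modules/installation.py | pacmanoptions
-- ===== SOURCE A (Python) =====
-- def pacmanoptions(text):
--     """A filter for pacman.conf to remove the repository info.
--     """
--     texto = ""
--     block = ""
--     for line in text.splitlines():
--         block += line + "\n"
--         if line.startswith("#["):
--             break
--         if line.startswith("[") and not line.startswith("[options]"):
--             break
--         if not line.strip():
--             texto += block
--             block = ""
--     return texto
-- ===== SOURCE B (Python) =====
-- def pacmanoptions(text):
--     """A filter for pacman.conf to remove the repository info.
--     """
--     lines = text.splitlines()
--     cutoff = len(lines)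
--     for i, line in enumerate(lines):
--         if line.startswith("#[") or (line.startswith("[") and not line.startswith("[options]")):
--             cutoff = i
--             break
--     last_blank = -1
--     for i, line in enumerate(lines[:cutoff]):
--         if not line.strip():
--             last_blank = i
--     return "".join(line + "\n" for line in lines[:last_blank + 1])
-- ===== Notes on version B (the rewrite author's own statement) =====
-- stated objective: alternative
-- what changed: Replaces A's single pass with a running block buffer flushed at each blank line by a two-pass index computation: find the cutoff (first repository header), find the last blank line before it, and join the line prefix up to that blank once.
import Mathlib
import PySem

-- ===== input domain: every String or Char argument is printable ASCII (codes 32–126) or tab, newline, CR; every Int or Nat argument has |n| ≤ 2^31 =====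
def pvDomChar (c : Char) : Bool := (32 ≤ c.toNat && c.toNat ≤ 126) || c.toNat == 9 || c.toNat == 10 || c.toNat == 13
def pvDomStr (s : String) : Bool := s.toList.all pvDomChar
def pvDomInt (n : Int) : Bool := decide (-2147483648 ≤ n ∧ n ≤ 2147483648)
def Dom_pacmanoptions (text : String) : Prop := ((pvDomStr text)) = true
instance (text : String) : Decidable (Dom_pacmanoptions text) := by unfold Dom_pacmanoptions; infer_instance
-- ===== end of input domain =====

-- B keeps A's exact output but by a two-pass index computation (cutoff line, last blank line,
-- one join of the prefix) instead of A's running block buffer; objective: alternative decomposition.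

-- ===== PORT A =====
-- literal port of A's loop: texto/block accumulators, break on a header line, flush on a blank line
def pacmanoptionsLoop : List String → String → String → String
  | [], texto, _ => texto
  | line :: rest, texto, block =>
    let block := block ++ line ++ "\n"
    if PySem.Str.startswith line "#[" then texto
    else if PySem.Str.startswith line "[" && !PySem.Str.startswith line "[options]" then texto
    else if PySem.Str.strip line == "" then pacmanoptionsLoop rest (texto ++ block) ""
    else pacmanoptionsLoop rest texto block

def pacmanoptions (text : String) : String :=
  pacmanoptionsLoop (PySem.Str.splitlines text) "" ""

-- ===== PORT B =====
def pvIsHeader (line : String) : Bool :=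
  PySem.Str.startswith line "#[" ||
    (PySem.Str.startswith line "[" && !PySem.Str.startswith line "[options]")

-- first loop of Source B: index of the first header line (none = loop ran through, cutoff stays len(lines))
def pvCutoffAux : List String → Nat → Option Nat
  | [], _ => none
  | line :: rest, i => if pvIsHeader line then some i else pvCutoffAux rest (i + 1)

-- second loop of Source B: last index with a blank line, over enumerate(lines[:cutoff]), start -1
def pvLastBlankAux : List (Int × String) → Int → Int
  | [], lastBlank => lastBlank
  | (i, line) :: rest, lastBlank =>
    pvLastBlankAux rest (if PySem.Str.strip line == "" then i else lastBlank)

def pacmanoptions_alt (text : String) : String :=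
  let lines := PySem.Str.splitlines text
  let cutoff : Int := ((pvCutoffAux lines 0).getD lines.length : Nat)
  let lastBlank := pvLastBlankAux (PySem.List.enumerate (PySem.List.slice lines (some 0) (some cutoff)) 0) (-1)
  String.join ((PySem.List.slice lines (some 0) (some (lastBlank + 1))).map (fun line => line ++ "\n"))

-- ===== PRECONDITION & SPEC =====
def Spec_pacmanoptions (text : String) (out : String) : Prop := out = pacmanoptions_alt text
instance (text : String) (out : String) : Decidable (Spec_pacmanoptions text out) := by unfold Spec_pacmanoptions; infer_instance

-- ===== CLAIM (what is proved, stated in full; the proofs are below) =====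
def Claim_equal_pacmanoptions : Prop := ∀ (text : String), Dom_pacmanoptions text → Spec_pacmanoptions text (pacmanoptions text)

-- ===== LEMMAS AND PROOFS =====

-- number of lines A's loop keeps (up to and including the last blank line before the first header)
def pvKeep : List String → Nat
  | [] => 0
  | line :: rest =>
    if pvIsHeader line then 0
    else if PySem.Str.strip line == "" then 1 + pvKeep rest
    else if pvKeep rest = 0 then 0 else 1 + pvKeep rest

-- index of the first header line, structurally
def pvFH : List String → Nat
  | [] => 0
  | line :: rest => if pvIsHeader line then 0 else 1 + pvFH rest

-- last blank index + 1, structurally (for header-free lists)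
def pvLK : List String → Nat
  | [] => 0
  | line :: rest =>
    if pvLK rest = 0 then (if PySem.Str.strip line == "" then 1 else 0) else 1 + pvLK rest

def pvCat (ls : List String) : String := String.join (ls.map (fun line => line ++ "\n"))

theorem join_cons (a : String) (l : List String) : String.join (a :: l) = a ++ String.join l := by
  show List.foldl (· ++ ·) ("" ++ a) l = a ++ String.join l
  have key : ∀ (l : List String) (x : String),
      List.foldl (· ++ ·) x l = x ++ List.foldl (· ++ ·) "" l := by
    intro l
    induction l with
    | nil => intro x; simp [List.foldl]
    | cons b t ih =>
      intro x
      simp only [List.foldl]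
      rw [ih (x ++ b), ih ("" ++ b), String.append_assoc]
      simp
  rw [key]
  simp [String.join]

theorem pvCat_cons (a : String) (l : List String) :
    pvCat (a :: l) = a ++ "\n" ++ pvCat l := by
  simp [pvCat, join_cons, String.append_assoc]

theorem loop_shift (lines : List String) :
    ∀ (texto block : String),
      pacmanoptionsLoop lines texto block = texto ++ pacmanoptionsLoop lines "" block := by
  induction lines with
  | nil => intro texto block; simp [pacmanoptionsLoop]
  | cons l rest ih =>
    intro texto block
    simp only [pacmanoptionsLoop]
    split_ifs with h1 h2 h3
    · simp
    · simp
    · rw [ih (texto ++ (block ++ l ++ "\n")), ih ("" ++ (block ++ l ++ "\n"))]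
      simp [String.append_assoc]
    · exact ih texto (block ++ l ++ "\n")

theorem loop_keep (lines : List String) :
    ∀ (block : String),
      pacmanoptionsLoop lines "" block =
        if pvKeep lines = 0 then "" else block ++ pvCat (lines.take (pvKeep lines)) := by
  induction lines with
  | nil => intro block; simp [pacmanoptionsLoop, pvKeep]
  | cons l rest ih =>
    intro block
    have hrest : pacmanoptionsLoop rest "" "" = pvCat (rest.take (pvKeep rest)) := by
      rw [ih ""]
      by_cases hk : pvKeep rest = 0
      · simp [hk, pvCat, String.join]
      · simp [hk]
    by_cases h1 : PySem.Str.startswith l "#[" = true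
    · have hh : pvIsHeader l = true := by unfold pvIsHeader; rw [h1, Bool.true_or]
      simp only [pacmanoptionsLoop, if_pos h1, pvKeep, if_pos hh]
      simp
    · by_cases h2 : (PySem.Str.startswith l "[" && !PySem.Str.startswith l "[options]") = true
      · have hh : pvIsHeader l = true := by unfold pvIsHeader; rw [h2, Bool.or_true]
        simp only [pacmanoptionsLoop, if_neg h1, if_pos h2, pvKeep, if_pos hh]
        simp
      · have hh : ¬ (pvIsHeader l = true) := by
          unfold pvIsHeader
          rw [Bool.eq_false_iff.mpr h1, Bool.eq_false_iff.mpr h2]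
          simp
        by_cases h3 : (PySem.Str.strip l == "") = true
        · have L : pacmanoptionsLoop (l :: rest) "" block
              = pacmanoptionsLoop rest ("" ++ (block ++ l ++ "\n")) "" := by
            simp only [pacmanoptionsLoop]
            rw [if_neg h1, if_neg h2, if_pos h3]
          rw [L, loop_shift, hrest]
          simp only [pvKeep, if_neg hh, if_pos h3]
          rw [if_neg (by omega : ¬ (1 + pvKeep rest = 0))]
          rw [(by omega : 1 + pvKeep rest = pvKeep rest + 1), List.take_succ_cons, pvCat_cons]
          simp [String.append_assoc]
        · have L : pacmanoptionsLoop (l :: rest) "" block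
              = pacmanoptionsLoop rest "" (block ++ l ++ "\n") := by
            simp only [pacmanoptionsLoop]
            rw [if_neg h1, if_neg h2, if_neg h3]
          rw [L, ih (block ++ l ++ "\n")]
          simp only [pvKeep, if_neg hh, if_neg h3]
          by_cases hk : pvKeep rest = 0
          · simp [hk]
          · rw [if_neg hk, if_neg hk, if_neg (by omega : ¬ (1 + pvKeep rest = 0))]
            rw [(by omega : 1 + pvKeep rest = pvKeep rest + 1), List.take_succ_cons, pvCat_cons]
            simp [String.append_assoc]

theorem A_eq_cat (lines : List String) :
    pacmanoptionsLoop lines "" "" = pvCat (lines.take (pvKeep lines)) := by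
  rw [loop_keep]
  by_cases hk : pvKeep lines = 0
  · simp [hk, pvCat, String.join]
  · simp [hk]

-- the first loop of B computes pvFH
theorem cutoff_eq (lines : List String) :
    ∀ (i : Nat), (pvCutoffAux lines i).getD (i + lines.length) = i + pvFH lines := by
  induction lines with
  | nil => intro i; simp [pvCutoffAux, pvFH]
  | cons l rest ih =>
    intro i
    simp only [pvCutoffAux, pvFH]
    by_cases h : pvIsHeader l = true
    · simp [h]
    · simp only [if_neg h, List.length_cons]
      have := ih (i + 1)
      rw [(by omega : i + (rest.length + 1) = i + 1 + rest.length), this]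
      omega

-- pvKeep on the full list = pvLK on the header-free prefix
theorem keep_eq_lk (lines : List String) :
    pvKeep lines = pvLK (lines.take (pvFH lines)) := by
  induction lines with
  | nil => rfl
  | cons l rest ih =>
    by_cases h : pvIsHeader l = true
    · simp [pvKeep, pvFH, h, pvLK]
    · simp only [pvKeep, pvFH, if_neg h,
        (by omega : 1 + pvFH rest = pvFH rest + 1), List.take_succ_cons, pvLK, ← ih]
      by_cases h3 : (PySem.Str.strip l == "") = true
      · simp only [if_pos h3]
        by_cases hk : pvKeep rest = 0
        · simp [hk]
        · simp [hk]
      · simp only [if_neg h3]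

-- the second loop of B computes pvLK - 1 (as -1 when pvLK = 0)
theorem lastBlank_eq (xs : List String) :
    ∀ (n : Nat) (lb : Int),
      pvLastBlankAux (PySem.List.enumerate xs (n : Int)) lb =
        if pvLK xs = 0 then lb else (n : Int) + pvLK xs - 1 := by
  induction xs with
  | nil => intro n lb; simp [PySem.List.enumerate_nil, pvLastBlankAux, pvLK]
  | cons l rest ih =>
    intro n lb
    rw [PySem.List.enumerate_cons]
    simp only [pvLastBlankAux, pvLK]
    have hcast : ((n : Int) + 1) = ((n + 1 : Nat) : Int) := by push_cast; ring
    rw [hcast, ih (n + 1)]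
    by_cases hk : pvLK rest = 0
    · by_cases h3 : (PySem.Str.strip l == "") = true
      · simp only [if_pos hk, if_pos h3]
        rw [if_neg (by omega : ¬ (1 = 0))]
        push_cast; ring
      · simp only [if_pos hk, if_neg h3]
        simp
    · simp only [if_neg hk]
      rw [if_neg (by omega : ¬ (1 + pvLK rest = 0))]
      push_cast; ring

-- ===== VERDICT (by name: the statement is the Claim_ definition above) =====
theorem pacmanoptions_spec : Claim_equal_pacmanoptions := by
  intro text _
  unfold Spec_pacmanoptions
  simp only [pacmanoptions, pacmanoptions_alt]
  set lines := PySem.Str.splitlines text with hl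
  rw [A_eq_cat]
  have hcut : ((pvCutoffAux lines 0).getD lines.length) = pvFH lines := by
    have h := cutoff_eq lines 0
    simpa using h
  rw [hcut]
  have hsl : PySem.List.slice lines (some 0) (some ((pvFH lines : Nat) : Int))
      = lines.take (pvFH lines) := by
    rw [PySem.List.slice_zero_start, PySem.List.slice_to_natCast]
  rw [hsl]
  have hlb : pvLastBlankAux (PySem.List.enumerate (lines.take (pvFH lines)) 0) (-1) + 1
      = ((pvLK (lines.take (pvFH lines)) : Nat) : Int) := by
    have h := lastBlank_eq (lines.take (pvFH lines)) 0 (-1)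
    simp only [Nat.cast_zero] at h
    rw [h]
    by_cases h0 : pvLK (lines.take (pvFH lines)) = 0
    · simp [h0]
    · rw [if_neg h0]; ring
  rw [hlb]
  have hsl2 : PySem.List.slice lines (some 0) (some ((pvLK (lines.take (pvFH lines)) : Nat) : Int))
      = lines.take (pvLK (lines.take (pvFH lines))) := by
    rw [PySem.List.slice_zero_start, PySem.List.slice_to_natCast]
  rw [hsl2, ← keep_eq_lk]
  rfl
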